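-- pv_equiv track=rewrite | github.com/JOSUEPORTALES/Redes-Neuronales-Python | 03 Enfoque_Logica/06 Aprendizaje Inductivo/008 Programación Lógica Inductiva FOIL.py | generar_regla_foil
-- ===== SOURCE A (Python) =====
-- def generar_regla_foil(ejemplos_positivos, ejemplos_negativos):
--     # Inicializamos una lista para guardar las condiciones candidatas
--     condiciones = []
--
--     # Revisamos todos los atributos del primer ejemplo positivo
--     for atributo in ejemplos_positivos[0]:
--         if atributo == "animal":
--             continue  # Saltamos el atributo "animal" porque solo es identificador
--
--         # Verificamos si el valor de este atributo es el mismo en todos los ejemplos positivos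
--         valor_posible = all(ejemplo[atributo] == ejemplos_positivos[0][atributo] for ejemplo in ejemplos_positivos)
--
--         # Verificamos si ese valor no aparece en los ejemplos negativos
--         valor_exclusivo = all(ejemplo[atributo] != ejemplos_positivos[0][atributo] for ejemplo in ejemplos_negativos)
--
--         # Si se cumple en todos los positivos y en ninguno de los negativos, es una buena regla
--         if valor_posible and valor_exclusivo:
--             condiciones.append((atributo, ejemplos_positivos[0][atributo]))
--
--     return condiciones
-- ===== SOURCE B (Python) =====
-- def generar_regla_foil(ejemplos_positivos, ejemplos_negativos):
--     # Candidate elimination: seed the rule with every (attribute, value) pair of the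
--     # first positive example (skipping the identifier), then sweep the examples once,
--     # discarding candidates contradicted by a positive or matched by a negative.
--     candidatas = [(a, v) for a, v in ejemplos_positivos[0].items() if a != "animal"]
--     for ejemplo in ejemplos_positivos[1:]:
--         candidatas = [(a, v) for (a, v) in candidatas if ejemplo[a] == v]
--     for ejemplo in ejemplos_negativos:
--         candidatas = [(a, v) for (a, v) in candidatas if ejemplo[a] != v]
--     return candidatas
-- ===== Notes on version B (the rewrite author's own statement) =====
-- stated objective: alternative
-- what changed: B is a candidate-elimination sweep: it seeds the rule with all (attribute, value) pairs of the first positive example and then iterates over the examples, filtering the surviving candidate list at each example, instead of A's loop over attributes with two nested all() scans over the example lists per attribute.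
import Mathlib
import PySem

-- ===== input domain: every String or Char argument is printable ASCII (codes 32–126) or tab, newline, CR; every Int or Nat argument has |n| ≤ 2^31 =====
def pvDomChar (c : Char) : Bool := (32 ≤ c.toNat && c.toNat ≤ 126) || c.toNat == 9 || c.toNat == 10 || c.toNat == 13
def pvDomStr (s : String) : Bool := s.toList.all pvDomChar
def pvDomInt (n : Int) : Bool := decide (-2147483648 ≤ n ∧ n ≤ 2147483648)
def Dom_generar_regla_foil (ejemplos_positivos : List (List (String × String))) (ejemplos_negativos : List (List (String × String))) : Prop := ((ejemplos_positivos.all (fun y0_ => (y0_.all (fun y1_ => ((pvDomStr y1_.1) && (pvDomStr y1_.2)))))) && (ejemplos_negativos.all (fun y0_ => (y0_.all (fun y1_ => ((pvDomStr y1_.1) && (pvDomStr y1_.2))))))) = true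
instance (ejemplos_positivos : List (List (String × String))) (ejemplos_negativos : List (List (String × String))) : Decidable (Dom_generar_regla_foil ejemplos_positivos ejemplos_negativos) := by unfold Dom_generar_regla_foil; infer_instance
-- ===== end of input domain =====

-- B is a candidate-elimination sweep over the examples (filtering a shrinking candidate list) instead of A's per-attribute nested all() scans (objective: alternative).


-- shared dict primitive: e[k] for the association-list dict, total form ("" only outside Pre_)
def dGet (d : List (String × String)) (k : String) : String := ((PySem.Dict.mk d).get? k).getD ""

-- the keys a Python 'for atributo in d' iterates (distinct keys, insertion order)
def dKeys (d : List (String × String)) : List String := PySem.List.dedup (d.map Prod.fst)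

-- ===== PORT A =====
def generar_regla_foil (ejemplos_positivos : List (List (String × String))) (ejemplos_negativos : List (List (String × String))) : List (String × String) :=
  let primero := PySem.List.pyGetD ejemplos_positivos 0 []   -- ejemplos_positivos[0]; IndexError excluded by Pre_
  (dKeys primero).foldl (fun condiciones atributo =>
    if atributo == "animal" then condiciones
    else
      let valor_posible := ejemplos_positivos.all (fun ejemplo => dGet ejemplo atributo == dGet primero atributo)
      let valor_exclusivo := ejemplos_negativos.all (fun ejemplo => dGet ejemplo atributo != dGet primero atributo)
      if valor_posible && valor_exclusivo then condiciones ++ [(atributo, dGet primero atributo)]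
      else condiciones) []

-- ===== PORT B =====
def generar_regla_foil_alt (ejemplos_positivos : List (List (String × String))) (ejemplos_negativos : List (List (String × String))) : List (String × String) :=
  let primero := PySem.List.pyGetD ejemplos_positivos 0 []   -- ejemplos_positivos[0]; IndexError excluded by Pre_
  -- primero.items() under the assoc-list dict convention: distinct keys in order, first-match values
  let candidatas0 := ((dKeys primero).map (fun a => (a, dGet primero a))).filter (fun av => av.1 != "animal")
  -- for ejemplo in ejemplos_positivos[1:]: keep candidates the example agrees with
  let candidatas1 := (PySem.List.slice ejemplos_positivos (some 1) none).foldl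
      (fun cs ejemplo => cs.filter (fun av => dGet ejemplo av.1 == av.2)) candidatas0
  -- for ejemplo in ejemplos_negativos: drop candidates the negative example matches
  ejemplos_negativos.foldl
      (fun cs ejemplo => cs.filter (fun av => dGet ejemplo av.1 != av.2)) candidatas1

-- ===== PRECONDITION & SPEC =====
-- scanOk xs a v stopEq: the left-to-right scan of xs on attribute a never reaches a missing key,
-- because any example missing a is preceded by one whose value already stops the scan
-- (value ≠ v for the positives' equality scan, value = v for the negatives' inequality scan)
def scanOk (xs : List (List (String × String))) (a v : String) (stopEq : Bool) : Bool :=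
  (List.range xs.length).all (fun i =>
    ((xs.getD i []).map Prod.fst).contains a ||
    (List.range i).any (fun j =>
      ((xs.getD j []).map Prod.fst).contains a &&
      (if stopEq then dGet (xs.getD j []) a == v else dGet (xs.getD j []) a != v)))

-- Pre_ is exactly the inputs on which Python A returns: positives nonempty (else IndexError), and for every
-- non-"animal" attribute of the first positive, neither short-circuiting scan reaches a missing key (else KeyError).
def Pre_generar_regla_foil (ejemplos_positivos : List (List (String × String))) (ejemplos_negativos : List (List (String × String))) : Prop :=
  ejemplos_positivos ≠ [] ∧
  ∀ a ∈ dKeys (PySem.List.pyGetD ejemplos_positivos 0 []), a ≠ "animal" →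
    scanOk ejemplos_positivos a (dGet (PySem.List.pyGetD ejemplos_positivos 0 []) a) false = true ∧
    scanOk ejemplos_negativos a (dGet (PySem.List.pyGetD ejemplos_positivos 0 []) a) true = true
instance (ejemplos_positivos : List (List (String × String))) (ejemplos_negativos : List (List (String × String))) : Decidable (Pre_generar_regla_foil ejemplos_positivos ejemplos_negativos) := by unfold Pre_generar_regla_foil; infer_instance

def pvWitness_generar_regla_foil : (List (List (String × String))) × (List (List (String × String))) :=
  ([[("animal", "perro"), ("patas", "4"), ("color", "cafe")], [("animal", "gato"), ("patas", "4"), ("color", "gris")]],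
   [[("animal", "pato"), ("patas", "2"), ("color", "blanco")]])

def Spec_generar_regla_foil (ejemplos_positivos : List (List (String × String))) (ejemplos_negativos : List (List (String × String))) (out : List (String × String)) : Prop := out = generar_regla_foil_alt ejemplos_positivos ejemplos_negativos
instance (ejemplos_positivos : List (List (String × String))) (ejemplos_negativos : List (List (String × String))) (out : List (String × String)) : Decidable (Spec_generar_regla_foil ejemplos_positivos ejemplos_negativos out) := by unfold Spec_generar_regla_foil; infer_instance

-- ===== CLAIM (what is proved, stated in full; the proofs are below) =====
def Claim_equal_generar_regla_foil : Prop := ∀ (ejemplos_positivos : List (List (String × String))) (ejemplos_negativos : List (List (String × String))), Dom_generar_regla_foil ejemplos_positivos ejemplos_negativos → Pre_generar_regla_foil ejemplos_positivos ejemplos_negativos → Spec_generar_regla_foil ejemplos_positivos ejemplos_negativos (generar_regla_foil ejemplos_positivos ejemplos_negativos)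

-- ===== LEMMAS AND PROOFS =====

-- A's accumulator loop is an append-filtered-map (its step either appends one pair or keeps the accumulator)
theorem foldlA_eq (keys : List String) (p q : String → Bool) (v : String → String) (acc : List (String × String)) :
    keys.foldl (fun condiciones atributo =>
      if atributo == "animal" then condiciones
      else if p atributo && q atributo then condiciones ++ [(atributo, v atributo)]
      else condiciones) acc
    = acc ++ ((keys.filter (fun a => a != "animal")).filter (fun a => p a && q a)).map (fun a => (a, v a)) := by
  induction keys generalizing acc with
  | nil => simp
  | cons x xs ih =>
    rw [List.foldl_cons]
    by_cases hx : (x == "animal") = true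
    · rw [if_pos hx, ih, List.filter_cons_of_neg (p := fun a => a != "animal") (l := xs) (by simp [bne, hx])]
    · rw [if_neg hx, List.filter_cons_of_pos (p := fun a => a != "animal") (l := xs) (by simp [bne, hx]), List.filter_cons]
      by_cases hpq : (p x && q x) = true
      · rw [if_pos hpq, ih, if_pos hpq, List.map_cons]
        simp
      · rw [if_neg hpq, ih, if_neg hpq]

-- B's sweep: folding a per-example filter over the example list filters by the conjunction over all examples
theorem foldl_filter_eq {α β : Type} (es : List β) (P : β → α → Bool) (l : List α) :
    es.foldl (fun cs e => cs.filter (P e)) l = l.filter (fun x => es.all (fun e => P e x)) := by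
  induction es generalizing l with
  | nil => simp
  | cons e es ih =>
    rw [List.foldl_cons, ih, List.filter_filter]
    apply List.filter_congr
    intro x _
    simp [Bool.and_comm]

-- filtering a mapped candidate list is mapping a filtered key list
theorem filter_map_eq {α β : Type} (l : List α) (f : α → β) (p : β → Bool) :
    (l.map f).filter p = (l.filter (fun a => p (f a))).map f := by
  induction l with
  | nil => rfl
  | cons x xs ih =>
    simp only [List.map_cons, List.filter_cons]
    by_cases h : p (f x) = true
    · rw [if_pos h, if_pos h, List.map_cons, ih]
    · rw [if_neg h, if_neg h, ih]

-- ===== VERDICT (by name: the statement is the Claim_ definition above) =====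
theorem generar_regla_foil_spec : Claim_equal_generar_regla_foil := by
  intro pos neg _ hpre
  obtain ⟨hne, -⟩ := hpre
  unfold Spec_generar_regla_foil generar_regla_foil generar_regla_foil_alt
  set primero := PySem.List.pyGetD pos 0 [] with hprim
  rw [foldlA_eq (dKeys primero)
      (fun a => pos.all (fun e => dGet e a == dGet primero a))
      (fun a => neg.all (fun e => dGet e a != dGet primero a))
      (fun a => dGet primero a) [],
      PySem.List.slice_from_one,
      foldl_filter_eq, foldl_filter_eq,
      filter_map_eq, filter_map_eq, filter_map_eq]
  simp only [List.nil_append, List.filter_filter]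
  congr 1
  apply List.filter_congr
  intro a ha
  -- on the B side the three key-level predicates are conjoined; reorganise and add the trivial head check
  obtain ⟨p0, rest, hpos⟩ : ∃ p0 rest, pos = p0 :: rest := by
    cases pos with
    | nil => exact absurd rfl hne
    | cons p0 rest => exact ⟨p0, rest, rfl⟩
  have hp0 : primero = p0 := by rw [hprim, hpos, PySem.List.pyGetD_zero_cons]
  rw [hpos, List.all_cons, List.tail_cons, hp0]
  simp [Bool.and_comm, Bool.and_left_comm]
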